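-- pv_equiv track=rewrite | github.com/sourabbanka22/Competitive-Programming-Foundation | HackerEarth/Math/Combinatorics/Inclusion-Exclusion/inclusionExclusion.py | inclusionExclusion
-- ===== SOURCE A (Python) =====
-- def intersectionCardinality(indices, sets):
--     if len(indices) == 0:
--         return 0
--
--     common = sets[indices[0]]
--     for idx in range(1, len(indices)):
--         common = common.intersection(sets[indices[idx]])
--
--     return len(common)
--
-- def inclusionExclusion(sets):
--     n = len(sets)
--     result = 0
--     b = 0
--     while b < (1 << n):
--         indices = []
--         k = 0
--         while k<n:
--             if b & (1 << k):
--                 indices.append(k)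
--             k += 1
--
--         cardinality = intersectionCardinality(indices, sets)
--         if len(indices) % 2 == 1:
--             result += cardinality
--         else:
--             result -= cardinality
--         b += 1
--
--     return result
-- ===== SOURCE B (Python) =====
-- def inclusionExclusion(sets):
--     union = set()
--     for s in sets:
--         union.update(s)
--     return len(union)
-- ===== Notes on version B (the rewrite author's own statement) =====
-- stated objective: faster
-- what changed: A evaluates the inclusion-exclusion alternating sum over all 2^n subset bitmasks, intersecting the chosen sets for each mask; B computes the same number (the cardinality of the union) directly by accumulating all elements into one set in a single pass.
import Mathlib
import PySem

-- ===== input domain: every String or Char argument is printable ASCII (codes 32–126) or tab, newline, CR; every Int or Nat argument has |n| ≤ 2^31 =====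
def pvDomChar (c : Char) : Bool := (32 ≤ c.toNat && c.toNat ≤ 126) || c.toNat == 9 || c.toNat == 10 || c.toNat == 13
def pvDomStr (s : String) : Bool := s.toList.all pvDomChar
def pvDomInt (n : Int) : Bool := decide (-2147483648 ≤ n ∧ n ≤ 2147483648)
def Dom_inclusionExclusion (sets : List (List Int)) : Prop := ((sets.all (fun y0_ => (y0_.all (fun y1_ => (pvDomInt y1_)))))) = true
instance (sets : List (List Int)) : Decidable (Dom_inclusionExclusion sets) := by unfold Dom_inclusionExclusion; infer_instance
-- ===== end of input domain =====

-- B replaces A's alternating sum over all 2^n subset bitmasks by a direct one-pass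
-- computation of the union's cardinality (objective: faster, asymptotically).

-- ===== PORT A =====
-- Python sets are modelled as duplicate-free lists (PySem.Set); only lengths of
-- intersections are used, so the unmodelled hash iteration order never matters.
def intersectionCardinality (indices : List Int) (sets : List (List Int)) : Int :=
  if indices.length = 0 then (0 : Int)
  else
    let common0 := PySem.List.pyGetD sets (PySem.List.pyGetD indices 0 0) []
    let common := (PySem.List.pyRange 1 (indices.length : Int) 1).foldl
      (fun c idx => PySem.Set.inter c (PySem.List.pyGetD sets (PySem.List.pyGetD indices idx 0) []))
      common0
    (common.length : Int)

def inclusionExclusion (sets : List (List Int)) : Int :=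
  let n : Nat := sets.length
  (PySem.List.pyRange 0 ((1 : Int) <<< n) 1).foldl
    (fun result b =>
      let indices := (PySem.List.pyRange 0 (n : Int) 1).foldl
        (fun acc k => if PySem.Int.band b ((1 : Int) <<< k.toNat) ≠ 0 then acc ++ [k] else acc) []
      let cardinality := intersectionCardinality indices sets
      if indices.length % 2 = 1 then result + cardinality else result - cardinality) 0

-- ===== PORT B =====
def inclusionExclusion_alt (sets : List (List Int)) : Int :=
  ((sets.foldl (fun union s => PySem.Set.update union s) PySem.Set.empty).length : Int)

-- ===== PRECONDITION & SPEC =====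
-- The Python argument is a list of SETS; under the type convention each set is a
-- duplicate-free list. Pre_ states exactly this representation invariant: inner
-- lists with duplicates do not denote any Python set-input of A (on such lists
-- A's arithmetic counts duplicates and the two programs legitimately differ).
def Pre_inclusionExclusion (sets : List (List Int)) : Prop := ∀ s ∈ sets, s.Nodup
instance (sets : List (List Int)) : Decidable (Pre_inclusionExclusion sets) := by
  unfold Pre_inclusionExclusion; infer_instance
def pvWitness_inclusionExclusion : List (List Int) := [[1, 2], [2, 3]]

def Spec_inclusionExclusion (sets : List (List Int)) (out : Int) : Prop := out = inclusionExclusion_alt sets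
instance (sets : List (List Int)) (out : Int) : Decidable (Spec_inclusionExclusion sets out) := by unfold Spec_inclusionExclusion; infer_instance

-- ===== CLAIM (what is proved, stated in full; the proofs are below) =====
def Claim_equal_inclusionExclusion : Prop := ∀ (sets : List (List Int)), Dom_inclusionExclusion sets → Pre_inclusionExclusion sets → Spec_inclusionExclusion sets (inclusionExclusion sets)

-- ===== LEMMAS AND PROOFS =====

-- Mathematical model: the sets selected by the bits of a mask, the cardinality of
-- their intersection, and the signed term of the inclusion-exclusion sum.
def selSets (b : Nat) : List (Finset Int) → List (Finset Int)
  | [] => []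
  | S :: L => (if b % 2 = 1 then [S] else []) ++ selSets (b / 2) L

def interOf : List (Finset Int) → Int
  | [] => 0
  | h :: t => ((t.foldl (· ∩ ·) h).card : Int)

def signedTerm (M : List (Finset Int)) : Int :=
  if M.length % 2 = 1 then interOf M else - interOf M

def unionL (L : List (Finset Int)) : Finset Int := L.foldr (· ∪ ·) ∅

lemma sum_range_two_mul (m : Nat) (f : Nat → Int) :
    ∑ b ∈ Finset.range (2 * m), f b = ∑ q ∈ Finset.range m, (f (2 * q) + f (2 * q + 1)) := by
  induction m with
  | zero => simp
  | succ m ih =>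
    have h : 2 * (m + 1) = (2 * m) + 1 + 1 := by ring
    rw [h, Finset.sum_range_succ, Finset.sum_range_succ, ih, Finset.sum_range_succ]
    ring_nf

lemma selSets_even (q : Nat) (S : Finset Int) (L : List (Finset Int)) :
    selSets (2 * q) (S :: L) = selSets q L := by
  simp [selSets, Nat.mul_mod_right, Nat.mul_div_cancel_left q (by norm_num : 0 < 2)]

lemma selSets_odd (q : Nat) (S : Finset Int) (L : List (Finset Int)) :
    selSets (2 * q + 1) (S :: L) = S :: selSets q L := by
  simp [selSets, Nat.mul_add_div (by norm_num : 0 < 2)]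

lemma selSets_zero (L : List (Finset Int)) : selSets 0 L = [] := by
  induction L with
  | nil => rfl
  | cons S L ih => simp [selSets, ih]

lemma foldl_inter_acc (S : Finset Int) (t : List (Finset Int)) :
    ∀ acc, t.foldl (· ∩ ·) (S ∩ acc) = S ∩ t.foldl (· ∩ ·) acc := by
  induction t with
  | nil => intro acc; rfl
  | cons x t ih =>
    intro acc
    simp only [List.foldl_cons, Finset.inter_assoc]
    exact ih (acc ∩ x)

lemma foldl_inter_map (S : Finset Int) (t : List (Finset Int)) :
    ∀ h, (t.map (S ∩ ·)).foldl (· ∩ ·) (S ∩ h) = S ∩ t.foldl (· ∩ ·) h := by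
  induction t with
  | nil => intro h; rfl
  | cons x t ih =>
    intro h
    simp only [List.map_cons, List.foldl_cons]
    have : (S ∩ h) ∩ (S ∩ x) = S ∩ (h ∩ x) := by
      ext a; simp; tauto
    rw [this]
    exact ih (h ∩ x)

lemma selSets_map (S : Finset Int) (b : Nat) :
    ∀ L : List (Finset Int), selSets b (L.map (S ∩ ·)) = (selSets b L).map (S ∩ ·) := by
  intro L
  induction L generalizing b with
  | nil => rfl
  | cons x L ih => simp only [List.map_cons, selSets]; split_ifs <;> simp [ih]

lemma interOf_cons (S : Finset Int) (M : List (Finset Int)) (hM : M ≠ []) :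
    interOf (S :: M) = interOf (M.map (S ∩ ·)) := by
  obtain ⟨h, t, rfl⟩ : ∃ h t, M = h :: t := by
    cases M with
    | nil => exact absurd rfl hM
    | cons h t => exact ⟨h, t, rfl⟩
  show ((((h :: t).foldl (· ∩ ·) S).card : Int)) = _
  simp only [interOf, List.map_cons, List.foldl_cons]
  rw [show S ∩ h = S ∩ h from rfl, foldl_inter_acc, foldl_inter_map]

lemma unionL_map_inter (S : Finset Int) (L : List (Finset Int)) :
    unionL (L.map (S ∩ ·)) = S ∩ unionL L := by
  induction L with
  | nil => simp [unionL]
  | cons x L ih =>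
    simp only [unionL, List.map_cons, List.foldr_cons] at *
    rw [ih, Finset.inter_union_distrib_left]

lemma selSets_eq_nil_iff (b : Nat) : ∀ L : List (Finset Int), b < 2 ^ L.length →
    (selSets b L = [] ↔ b = 0) := by
  induction b using Nat.strong_induction_on with
  | _ b ih => ?_
  intro L hb
  cases L with
  | nil =>
    simp only [List.length_nil, pow_zero, Nat.lt_one_iff] at hb
    simp [selSets_zero, hb]
  | cons S L =>
    simp only [selSets, List.append_eq_nil_iff]
    constructor
    · rintro ⟨h1, h2⟩
      have hmod : b % 2 = 0 := by
        rcases Nat.mod_two_eq_zero_or_one b with h | h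
        · exact h
        · simp [h] at h1
      have hb2 : b / 2 < 2 ^ L.length := by
        simp only [List.length_cons, pow_succ] at hb; omega
      rcases Nat.eq_zero_or_pos b with h0 | hpos
      · exact h0
      have := (ih (b / 2) (by omega) L hb2).mp h2
      omega
    · rintro rfl
      simp [selSets_zero]

-- The heart: the alternating bitmask sum equals the cardinality of the union.
lemma gSum_eq (n : Nat) : ∀ L : List (Finset Int), L.length = n →
    ∑ b ∈ Finset.range (2 ^ n), signedTerm (selSets b L) = ((unionL L).card : Int) := by
  induction n with
  | zero =>
    intro L hL
    rw [List.length_eq_zero_iff] at hL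
    subst hL
    simp [selSets_zero, signedTerm, interOf, unionL]
  | succ n ih =>
    intro L hL
    cases L with
    | nil => simp at hL
    | cons S L0 =>
    have hlen : L0.length = n := by simpa using hL
    have hsplit : (2 : Nat) ^ (n + 1) = 2 * 2 ^ n := by ring
    rw [hsplit, sum_range_two_mul]
    have hkey : ∀ q ∈ Finset.range (2 ^ n),
        signedTerm (selSets (2 * q) (S :: L0)) + signedTerm (selSets (2 * q + 1) (S :: L0)) =
        signedTerm (selSets q L0) +
          ((if q = 0 then (S.card : Int) else 0) - signedTerm (selSets q (L0.map (S ∩ ·)))) := by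
      intro q hq
      rw [Finset.mem_range] at hq
      rw [selSets_even, selSets_odd, selSets_map]
      rcases eq_or_ne q 0 with rfl | hq0
      · simp [selSets_zero, signedTerm, interOf]
      · have hM : selSets q L0 ≠ [] := by
          rw [ne_eq, selSets_eq_nil_iff q L0 (hlen ▸ hq)]
          exact hq0
        have hc := interOf_cons S (selSets q L0) hM
        simp only [signedTerm, hc, List.length_cons, List.length_map, if_neg hq0]
        rcases Nat.mod_two_eq_zero_or_one (selSets q L0).length with h | h <;>
          simp [h, Nat.add_mod]
    rw [Finset.sum_congr rfl hkey, Finset.sum_add_distrib, Finset.sum_sub_distrib,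
      ih L0 hlen, ih (L0.map (S ∩ ·)) (by simpa using hlen), unionL_map_inter]
    have h0 : ∑ q ∈ Finset.range (2 ^ n), (if q = 0 then (S.card : Int) else 0) = S.card := by
      rw [Finset.sum_ite_eq' (Finset.range (2 ^ n)) 0 (fun _ => (S.card : Int))]
      simp
    rw [h0]
    have hcu := Finset.card_union_add_card_inter S (unionL L0)
    have : unionL (S :: L0) = S ∪ unionL L0 := rfl
    rw [this]
    omega

-- Bridge A: the bitmask loops of the port compute the model's terms.

lemma selSets_eq_filter (b : Nat) (L : List (Finset Int)) :
    selSets b L = ((List.range L.length).filter (fun k => b.testBit k)).map (fun k => L.getD k ∅) := by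
  induction L generalizing b with
  | nil => rfl
  | cons S L ih =>
    simp only [selSets, List.length_cons, List.range_succ_eq_map, List.filter_cons,
      List.filter_map, Nat.testBit_zero]
    rcases Nat.mod_two_eq_zero_or_one b with h | h <;>
      simp [h, ih (b / 2), Function.comp_def, Nat.testBit_add_one]

lemma one_shl_int (k : Nat) : ((1 : Int) <<< (k : Int)) = ((1 <<< k : Nat) : Int) := by
  show ShiftLeft.shiftLeft _ _ = _
  show ((Nat.shiftLeft' false 1 k : Nat) : Int) = _
  rw [Nat.shiftLeft'_false]

lemma band_bit (b k : Nat) :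
    (PySem.Int.band (b : Int) ((1 : Int) <<< (((k : Int)).toNat : Int)) ≠ 0) ↔ b.testBit k = true := by
  have h1 : (((k : Int)).toNat : Int) = (k : Int) := by simp
  rw [h1, one_shl_int, PySem.Int.band_natCast, Nat.one_shiftLeft, Nat.and_two_pow]
  cases h : b.testBit k <;> simp

lemma indices_loop_eq (b : Nat) (n : Nat) :
    (PySem.List.pyRange 0 (n : Int) 1).foldl
      (fun acc k => if PySem.Int.band (b : Int) ((1 : Int) <<< k.toNat) ≠ 0 then acc ++ [k] else acc) []
    = ((List.range n).filter (fun k => b.testBit k)).map (fun k : Nat => (k : Int)) := by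
  rw [PySem.List.pyRange_zero_nat, List.foldl_map]
  rw [PySem.List.foldl_congr_mem (List.range n) _
    (fun acc (k : Nat) => if b.testBit k then acc ++ [(k : Int)] else acc) []
    (by
      intro acc k _
      by_cases h : b.testBit k = true
      · simp only [if_pos ((band_bit b k).mpr h), if_pos h]
      · simp only [if_neg (fun hc => h ((band_bit b k).mp hc)), if_neg h])]
  rw [PySem.List.foldl_append_if (fun k => b.testBit k) (fun k : Nat => (k : Int)) (List.range n) []]
  simp

-- toFinset commutes with the list-set intersection used by port A.
lemma toFinset_setInter (c d : List Int) :
    (PySem.Set.inter c d).toFinset = c.toFinset ∩ d.toFinset := by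
  ext a
  simp [List.mem_toFinset, PySem.Set.mem_inter]

lemma toFinset_setUpdate (c s : List Int) :
    (PySem.Set.update c s).toFinset = c.toFinset ∪ s.toFinset := by
  ext a
  simp [List.mem_toFinset, PySem.Set.mem_update]

-- Intersection chain of nodup lists versus Finset intersection chain.
lemma inter_chain (sets : List (List Int)) (hnd : ∀ s ∈ sets, s.Nodup) :
    ∀ (t : List Nat) (c : List Int), c.Nodup →
    (((t.foldl (fun c k => PySem.Set.inter c (sets.getD k [])) c).length : Int))
      = (((t.map (fun k => (sets.map List.toFinset).getD k ∅)).foldl (· ∩ ·) c.toFinset).card : Int) := by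
  intro t
  induction t with
  | nil =>
    intro c hc
    simp [List.toFinset_card_of_nodup hc]
  | cons i t ih =>
    intro c hc
    have hgnd : (sets.getD i []).Nodup := by
      by_cases h : i < sets.length
      · have : sets.getD i [] ∈ sets := by
          rw [List.getD_eq_getElem sets [] h]; exact List.getElem_mem h
        exact hnd _ this
      · rw [List.getD_eq_default sets [] (by omega)]; exact List.nodup_nil
    have hmapD : (sets.getD i []).toFinset = (sets.map List.toFinset).getD i ∅ :=
      (List.getD_map sets ([] : List Int) List.toFinset (n := i)).symm
    simp only [List.foldl_cons, List.map_cons]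
    rw [ih _ (PySem.Set.nodup_inter _ _ hc), toFinset_setInter, hmapD]

lemma interCard_eq (sets : List (List Int)) (hnd : ∀ s ∈ sets, s.Nodup) (natIdx : List Nat) :
    intersectionCardinality (natIdx.map (fun k : Nat => (k : Int))) sets
      = interOf (natIdx.map (fun k => (sets.map List.toFinset).getD k ∅)) := by
  cases natIdx with
  | nil => rfl
  | cons i t =>
    rw [intersectionCardinality]
    simp only [List.map_cons, List.length_cons]
    rw [if_neg (Nat.succ_ne_zero _)]
    rw [PySem.List.pyGetD_zero_cons]
    rw [show PySem.List.pyGetD sets ((i : Nat) : Int) [] = sets.getD i [] from by simp]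
    rw [show (t.map (fun k : Nat => (k : Int))).length + 1
        = ((i : Int) :: t.map (fun k : Nat => (k : Int))).length from rfl]
    rw [PySem.List.foldl_pyRange_pyGetD' ((i : Int) :: t.map (fun k : Nat => (k : Int))) 0
      (fun c ix => PySem.Set.inter c (PySem.List.pyGetD sets ix [])) _ (by norm_num : (0:Int) ≤ 1)]
    simp only [Int.toNat_one, List.drop_one, List.tail_cons, List.foldl_map]
    have hgnd : (sets.getD i []).Nodup := by
      by_cases h : i < sets.length
      · have : sets.getD i [] ∈ sets := by
          rw [List.getD_eq_getElem sets [] h]; exact List.getElem_mem h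
        exact hnd _ this
      · rw [List.getD_eq_default sets [] (by omega)]; exact List.nodup_nil
    have hmapD : (sets.getD i []).toFinset = (sets.map List.toFinset).getD i ∅ :=
      (List.getD_map sets ([] : List Int) List.toFinset (n := i)).symm
    have hch := inter_chain sets hnd t (sets.getD i []) hgnd
    simp only [interOf]
    rw [← hmapD]
    convert hch using 3
    · simp [PySem.List.pyGetD_natCast]

-- Bridge B: the one-pass union accumulation.
lemma foldl_update_spec (sets : List (List Int)) :
    ∀ acc : List Int, acc.Nodup →
      (sets.foldl (fun u s => PySem.Set.update u s) acc).Nodup ∧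
      (sets.foldl (fun u s => PySem.Set.update u s) acc).toFinset
        = acc.toFinset ∪ unionL (sets.map List.toFinset) := by
  induction sets with
  | nil => intro acc hacc; simpa [unionL] using hacc
  | cons s sets ih =>
    intro acc hacc
    obtain ⟨h1, h2⟩ := ih (PySem.Set.update acc s) (PySem.Set.nodup_update acc s hacc)
    refine ⟨h1, ?_⟩
    simp only [List.foldl_cons, List.map_cons]
    rw [h2, toFinset_setUpdate]
    show _ = _ ∪ unionL (s.toFinset :: sets.map List.toFinset)
    simp [unionL, Finset.union_assoc]

lemma alt_eq_card (sets : List (List Int)) :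
    inclusionExclusion_alt sets = ((unionL (sets.map List.toFinset)).card : Int) := by
  obtain ⟨h1, h2⟩ := foldl_update_spec sets [] List.nodup_nil
  rw [inclusionExclusion_alt]
  show ((List.foldl (fun u s => PySem.Set.update u s) ([] : List Int) sets).length : Int) = _
  rw [← List.toFinset_card_of_nodup h1, h2]
  simp

lemma list_sum_range (n : Nat) (f : Nat → Int) :
    ((List.range n).map f).sum = ∑ i ∈ Finset.range n, f i := by
  induction n with
  | zero => simp
  | succ n ih => simp [List.range_succ, Finset.sum_range_succ, ih]

theorem inclusionExclusion_spec : Claim_equal_inclusionExclusion := by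
  intro sets _ hpre
  unfold Spec_inclusionExclusion
  rw [alt_eq_card, ← gSum_eq sets.length (sets.map List.toFinset) (by simp)]
  rw [inclusionExclusion]
  have hbound : ((1 : Int) <<< (sets.length : Nat)) = (((2 ^ sets.length : Nat) : Nat) : Int) := by
    rw [Int.shiftLeft_eq]; push_cast; ring
  rw [hbound, PySem.List.pyRange_zero_nat (2 ^ sets.length), List.foldl_map]
  rw [PySem.List.foldl_congr_mem (List.range (2 ^ sets.length)) _
    (fun (r : Int) (b : Nat) => r + signedTerm (selSets b (sets.map List.toFinset))) 0
    (by
      intro r b _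
      rw [indices_loop_eq b sets.length]
      dsimp only
      rw [interCard_eq sets hpre]
      have hsel : selSets b (sets.map List.toFinset)
          = (((List.range sets.length).filter (fun k => b.testBit k)).map
              (fun k => (sets.map List.toFinset).getD k ∅)) := by
        rw [selSets_eq_filter b (sets.map List.toFinset)]
        simp
      rw [List.length_map, signedTerm, hsel, List.length_map]
      split_ifs with h
      · rfl
      · ring)]
  rw [PySem.List.foldl_add (List.range (2 ^ sets.length))
    (fun b => signedTerm (selSets b (sets.map List.toFinset))) 0, zero_add,
    list_sum_range]
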